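-- pv_equiv track=rewrite | github.com/DC-29/Console-Flappy-Bird | main_file.py | calculate_hitspot
-- ===== SOURCE A (Python) =====
-- def calculate_hitspot(n:int,position:int,lengths:list,orientations:list):
--     """
--     Returns the Y-coordinate of the end of the bar that has the same X-coordinates as the bird
--     Attributes:
--         n : Number of bars
--         position : x-coordinate of the first bar
--         lengths : lengths of the bars as a list. The size of the list must be equal to the number of bars
--         orientation : orientation of bars as a list. The size of the list must be equal to number of bars
--                       list must contain only 1s and 0s, where 1 denotes bottom bar and 0 denotes top bar
--     """
--     hit_ori = 0
--     for i in range(n):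
--         #The following addition/subtraction have been made to the position attribute because one bar takes up 4 units on X coordinate
--         if position-2<=bird_x_pos<=position+3:
--             if orientations[i] == 0:
--                 hitspot = lengths[i]+2
--                 hit_ori=0
--                 break
--             elif orientations[i] == 1:
--                 hitspot = bottom_lim - lengths[i]
--                 hit_ori=1
--                 break
--         else:
--             position+=dist_btw_bars
--     else:
--         return None,None
--     return hit_ori,hitspot
--
-- dist_btw_bars = 8
--
-- bottom_lim = 10
--
-- bird_x_pos = 20
-- ===== SOURCE B (Python) =====
-- dist_btw_bars = 8
--
-- bottom_lim = 10
--
-- bird_x_pos = 20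
--
-- def calculate_hitspot(n:int,position:int,lengths:list,orientations:list):
--     """
--     The bars sit 8 units apart, so the bar whose 6-wide window covers the
--     bird's x is determined by one floor division; index the lists directly.
--     """
--     offset = bird_x_pos + 2 - position
--     i = offset // dist_btw_bars
--     if 0 <= i < n and offset % dist_btw_bars <= 5:
--         if orientations[i] == 0:
--             return 0, lengths[i] + 2
--         return 1, bottom_lim - lengths[i]
--     return None, None
-- ===== Notes on version B (the rewrite author's own statement) =====
-- stated objective: alternative
-- what changed: A steps the bar position by dist_btw_bars through up to n bars testing the bird window at each; B computes the unique aligned bar index with one floor division (O(1)) and indexes the lists directly; Pre_ excludes inputs where the aligned bar exists but its orientation is not 0/1 or the lists are shorter than that index (the docstring forbids both; there A either raises IndexError or accidentally scans on to a later bar at an unchanged position).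
-- outside the precondition, e.g. on calculate_hitspot(2, 17, [5, 6], [7, 0]): A returns (0, 8), B returns (1, 5)
import Mathlib
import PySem

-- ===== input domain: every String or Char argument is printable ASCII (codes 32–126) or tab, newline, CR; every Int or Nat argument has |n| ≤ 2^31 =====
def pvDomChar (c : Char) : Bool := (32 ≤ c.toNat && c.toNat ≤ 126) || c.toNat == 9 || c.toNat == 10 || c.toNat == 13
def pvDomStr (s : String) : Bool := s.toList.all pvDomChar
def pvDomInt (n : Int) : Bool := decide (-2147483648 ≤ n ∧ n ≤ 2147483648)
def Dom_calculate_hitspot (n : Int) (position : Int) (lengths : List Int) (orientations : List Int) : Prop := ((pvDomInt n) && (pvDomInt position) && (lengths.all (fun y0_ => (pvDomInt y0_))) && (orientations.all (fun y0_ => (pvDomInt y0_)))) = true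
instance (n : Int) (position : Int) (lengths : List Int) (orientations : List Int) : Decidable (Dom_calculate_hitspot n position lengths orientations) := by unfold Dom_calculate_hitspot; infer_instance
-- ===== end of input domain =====

-- B replaces A's bar-by-bar position stepping by one floor division that locates the unique
-- bar aligned with the bird's x and indexes the lists directly (objective: alternative, a closed-form index instead of a scan).

-- module constants shared by both sources
def dist_btw_bars : Int := 8
def bottom_lim : Int := 10
def bird_x_pos : Int := 20

-- ===== PORT A =====
-- A's for-loop over range(n): fuel = remaining iterations, i = current index, position = current bar x.
-- pyGet? = none is a Python IndexError (excluded by Pre_); the port returns (none, none) there.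
def chLoopA (lengths orientations : List Int) : Nat → Nat → Int → Option Int × Option Int
  | 0, _, _ => (none, none)
  | fuel+1, i, position =>
    if position - 2 ≤ bird_x_pos ∧ bird_x_pos ≤ position + 3 then
      match PySem.List.pyGet? orientations (i : Int) with
      | some o =>
        if o = 0 then
          match PySem.List.pyGet? lengths (i : Int) with
          | some l => (some 0, some (l + 2))
          | none => (none, none)
        else if o = 1 then
          match PySem.List.pyGet? lengths (i : Int) with
          | some l => (some 1, some (bottom_lim - l))
          | none => (none, none)
        else chLoopA lengths orientations fuel (i+1) position
      | none => (none, none)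
    else chLoopA lengths orientations fuel (i+1) (position + dist_btw_bars)

def calculate_hitspot (n : Int) (position : Int) (lengths : List Int) (orientations : List Int) : Option Int × Option Int :=
  chLoopA lengths orientations n.toNat 0 position

-- ===== PORT B =====
-- straight-line: offset // 8 is the only candidate bar index; pyGet? = none (IndexError,
-- excluded by Pre_) is rendered as (none, none).
def calculate_hitspot_alt (n : Int) (position : Int) (lengths : List Int) (orientations : List Int) : Option Int × Option Int :=
  let offset := bird_x_pos + 2 - position
  let i := PySem.Int.floordiv offset dist_btw_bars
  if 0 ≤ i ∧ i < n ∧ PySem.Int.mod offset dist_btw_bars ≤ 5 then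
    match PySem.List.pyGet? orientations i, PySem.List.pyGet? lengths i with
    | some o, some l => if o = 0 then (some 0, some (l + 2)) else (some 1, some (bottom_lim - l))
    | _, _ => (none, none)
  else (none, none)

-- ===== PRECONDITION & SPEC =====
-- Pre_ excludes exactly the inputs where the bar aligned with the bird exists (index i = (22-position)//8
-- with 0 ≤ i < n and the window matching) but the docstring's contract is broken there: the lists are
-- shorter than i+1 (A raises IndexError) or orientations[i] ∉ {0,1} (A accidentally keeps scanning
-- later bars at an unchanged position and may return a value keyed to a different bar).
def Pre_calculate_hitspot (n : Int) (position : Int) (lengths : List Int) (orientations : List Int) : Prop :=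
  (0 ≤ PySem.Int.floordiv (22 - position) 8 ∧ PySem.Int.floordiv (22 - position) 8 < n ∧
      PySem.Int.mod (22 - position) 8 ≤ 5) →
    (PySem.Int.floordiv (22 - position) 8 < (lengths.length : Int) ∧
     PySem.Int.floordiv (22 - position) 8 < (orientations.length : Int) ∧
     (PySem.List.pyGet? orientations (PySem.Int.floordiv (22 - position) 8) = some 0 ∨
      PySem.List.pyGet? orientations (PySem.Int.floordiv (22 - position) 8) = some 1))
instance (n : Int) (position : Int) (lengths : List Int) (orientations : List Int) : Decidable (Pre_calculate_hitspot n position lengths orientations) := by unfold Pre_calculate_hitspot; infer_instance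
def pvWitness_calculate_hitspot : Int × Int × List Int × List Int := (2, 9, [3, 4], [1, 0])
def Spec_calculate_hitspot (n : Int) (position : Int) (lengths : List Int) (orientations : List Int) (out : Option Int × Option Int) : Prop := out = calculate_hitspot_alt n position lengths orientations
instance (n : Int) (position : Int) (lengths : List Int) (orientations : List Int) (out : Option Int × Option Int) : Decidable (Spec_calculate_hitspot n position lengths orientations out) := by unfold Spec_calculate_hitspot; infer_instance

-- ===== CLAIM (what is proved, stated in full; the proofs are below) =====
def Claim_equal_calculate_hitspot : Prop := ∀ (n : Int) (position : Int) (lengths : List Int) (orientations : List Int), Dom_calculate_hitspot n position lengths orientations → Pre_calculate_hitspot n position lengths orientations → Spec_calculate_hitspot n position lengths orientations (calculate_hitspot n position lengths orientations)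

-- ===== LEMMAS AND PROOFS =====

-- The bird window holds at bar j iff j is exactly the index B computes (and the remainder is ≤ 5).
lemma window_iff (position : Int) (j : Int) :
    (17 ≤ position + 8 * j ∧ position + 8 * j ≤ 22) ↔
    (j = PySem.Int.floordiv (22 - position) 8 ∧ PySem.Int.mod (22 - position) 8 ≤ 5) := by
  have hq := PySem.Int.floordiv_mul_add_mod (22 - position) 8
  have hm0 : 0 ≤ PySem.Int.mod (22 - position) 8 := by
    rw [PySem.Int.mod_eq_emod_of_pos (by norm_num : (0:Int) < 8)]
    exact Int.emod_nonneg _ (by norm_num)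
  have hm1 : PySem.Int.mod (22 - position) 8 < 8 := by
    rw [PySem.Int.mod_eq_emod_of_pos (by norm_num : (0:Int) < 8)]
    exact Int.emod_lt_of_pos _ (by norm_num)
  omega

-- Main loop invariant: if the window was not hit before index i, A's remaining loop equals B.
lemma loopA_eq (n position : Int) (lengths orientations : List Int)
    (hpre : Pre_calculate_hitspot n position lengths orientations) :
    ∀ (f i : Nat), (i : Int) + f = n.toNat →
      (∀ k : Nat, k < i → ¬(17 ≤ position + 8 * k ∧ position + 8 * k ≤ 22)) →
      chLoopA lengths orientations f i (position + 8 * i) =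
        calculate_hitspot_alt n position lengths orientations := by
  intro f
  induction f with
  | zero =>
    intro i hi hinv
    unfold calculate_hitspot_alt
    simp only [bird_x_pos, dist_btw_bars, show (20:Int) + 2 - position = 22 - position from by ring]
    rw [if_neg]
    · rfl
    · rintro ⟨hq0, hqn, hr⟩
      have hwin : 17 ≤ position + 8 * PySem.Int.floordiv (22 - position) 8 ∧
          position + 8 * PySem.Int.floordiv (22 - position) 8 ≤ 22 :=
        (window_iff position _).mpr ⟨rfl, hr⟩
      have hcast : (((PySem.Int.floordiv (22 - position) 8).toNat : Nat) : Int) =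
          PySem.Int.floordiv (22 - position) 8 := Int.toNat_of_nonneg hq0
      exact hinv (PySem.Int.floordiv (22 - position) 8).toNat (by omega)
        ⟨by rw [hcast]; exact hwin.1, by rw [hcast]; exact hwin.2⟩
  | succ f ih =>
    intro i hi hinv
    by_cases hw : position + 8 * (i : Int) - 2 ≤ bird_x_pos ∧ bird_x_pos ≤ position + 8 * (i : Int) + 3
    · have hw' : 17 ≤ position + 8 * (i : Int) ∧ position + 8 * (i : Int) ≤ 22 := by
        unfold bird_x_pos at hw; omega
      obtain ⟨hiq, hr⟩ := (window_iff position (i : Int)).mp hw'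
      have hqn : PySem.Int.floordiv (22 - position) 8 < n := by omega
      obtain ⟨hlen, holen, ho⟩ := hpre ⟨by omega, hqn, hr⟩
      have hilen : i < lengths.length := by omega
      have hl : PySem.List.pyGet? lengths ((i : Nat) : Int) = some lengths[i] := by
        simp [List.getElem?_eq_getElem hilen]
      have ho' : PySem.List.pyGet? orientations ((i : Nat) : Int) = some 0 ∨
          PySem.List.pyGet? orientations ((i : Nat) : Int) = some 1 := by
        rw [hiq]; exact ho
      unfold calculate_hitspot_alt
      simp only [bird_x_pos, dist_btw_bars, show (20:Int) + 2 - position = 22 - position from by ring]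
      rw [if_pos ⟨by omega, hqn, hr⟩, ← hiq]
      simp only [chLoopA]
      rw [if_pos hw]
      rcases ho' with h | h <;> rw [h, hl] <;> simp
    · have step : chLoopA lengths orientations (f+1) i (position + 8 * i) =
          chLoopA lengths orientations f (i+1) (position + 8 * ((i : Nat)+1)) := by
        simp only [chLoopA]
        rw [if_neg hw]
        unfold dist_btw_bars
        congr 1
        push_cast [Nat.cast_add]
        ring
      rw [step]
      apply ih (i+1) (by push_cast at hi ⊢; omega)
      intro k hk
      rcases Nat.lt_succ_iff_lt_or_eq.mp hk with h | h
      · exact hinv k h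
      · subst h
        intro hc
        exact hw (by unfold bird_x_pos; omega)

-- ===== VERDICT (by name: the statement is the Claim_ definition above) =====
theorem calculate_hitspot_spec : Claim_equal_calculate_hitspot := by
  intro n position lengths orientations _ hpre
  unfold Spec_calculate_hitspot calculate_hitspot
  have := loopA_eq n position lengths orientations hpre n.toNat 0 (by simp) (by intro k hk; omega)
  simpa using this
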